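-- pv_equiv track=rewrite | github.com/MiCar98/Multiple_Courier_Planning | Bool_utils.py | sum_bool_same_len
-- ===== SOURCE A (Python) =====
-- def sum_bool_same_len(u, v):
--   carry = False
--   res = []
--   for i in reversed(range(len(v))):
--     if carry:
--       if u[i] ^ v[i]:
--         res.append(False)
--       elif u[i] and v[i]:
--         res.append(True)
--       else:
--         res.append(True)
--         carry=False
--     else:
--       if u[i] ^ v[i]:
--         res.append(True)
--       elif u[i] and v[i]:
--         carry = True
--         res.append(False)
--       else:
--         res.append(False)
--
--   res.reverse()
--   return res
-- ===== SOURCE B (Python) =====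
-- def sum_bool_same_len(u, v):
--     # Convert both operands to integers (MSB-first Horner), add once,
--     # then peel the low len(v) bits back off (dropping the overflow carry).
--     ua = 0
--     va = 0
--     for i in range(len(v)):
--         ua = 2 * ua + u[i]
--         va = 2 * va + v[i]
--     total = ua + va
--     res = []
--     for _ in range(len(v)):
--         res.append(total % 2 == 1)
--         total //= 2
--     res.reverse()
--     return res
-- ===== Notes on version B (the rewrite author's own statement) =====
-- stated objective: alternative
-- what changed: Replaces the boolean ripple-carry case analysis with integer arithmetic: both bool lists are converted to integers (Horner), added once, and the low len(v) bits of the sum are peeled back off, dropping the overflow carry exactly as A does.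
import Mathlib
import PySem

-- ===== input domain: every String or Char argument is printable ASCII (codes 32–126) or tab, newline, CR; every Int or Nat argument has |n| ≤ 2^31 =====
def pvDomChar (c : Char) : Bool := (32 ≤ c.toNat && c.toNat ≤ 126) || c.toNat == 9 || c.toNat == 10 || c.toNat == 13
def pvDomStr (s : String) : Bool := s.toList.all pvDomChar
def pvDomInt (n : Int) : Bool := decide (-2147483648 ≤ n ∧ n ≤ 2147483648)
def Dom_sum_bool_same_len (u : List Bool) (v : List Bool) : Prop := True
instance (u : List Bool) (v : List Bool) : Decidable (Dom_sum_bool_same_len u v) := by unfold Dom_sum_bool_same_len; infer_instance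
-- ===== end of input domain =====

-- B replaces A's ripple-carry boolean case analysis by one integer addition
-- (Horner encode, add, peel the low len(v) bits back off); objective: alternative.

-- ===== PORT A =====
-- loop body of A's 'for i in reversed(range(len(v)))'; pyGet?.getD is u[i]/v[i],
-- in range for every index the loop visits whenever Pre_ holds (else Python raises IndexError)
def stepA (u : List Bool) (v : List Bool) (st : Bool × List Bool) (i : Int) : Bool × List Bool :=
  let carry := st.1
  let res := st.2
  let ui := (PySem.List.pyGet? u i).getD false
  let vi := (PySem.List.pyGet? v i).getD false
  if carry then
    if ui ^^ vi then (carry, res ++ [false])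
    else if ui && vi then (carry, res ++ [true])
    else (false, res ++ [true])
  else
    if ui ^^ vi then (carry, res ++ [true])
    else if ui && vi then (true, res ++ [false])
    else (carry, res ++ [false])

def sum_bool_same_len (u : List Bool) (v : List Bool) : List Bool :=
  (((PySem.List.pyRange 0 (v.length : Int) 1).reverse.foldl (stepA u v) (false, [])).2).reverse

-- ===== PORT B =====
-- 'for _ in range(n): res.append(total % 2 == 1); total //= 2'  (total is a nonnegative int,
-- so Nat % and / are exactly Python's % and //)
def peelB : Nat → Nat × List Bool → Nat × List Bool
  | 0, st => st
  | k + 1, st => peelB k (st.1 / 2, st.2 ++ [decide (st.1 % 2 = 1)])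

def sum_bool_same_len_alt (u : List Bool) (v : List Bool) : List Bool :=
  let p := (PySem.List.pyRange 0 (v.length : Int) 1).foldl
    (fun (st : Nat × Nat) i =>
      (2 * st.1 + ((PySem.List.pyGet? u i).getD false).toNat,
       2 * st.2 + ((PySem.List.pyGet? v i).getD false).toNat)) (0, 0)
  let total := p.1 + p.2
  ((peelB v.length (total, [])).2).reverse

-- ===== PRECONDITION & SPEC =====
-- Pre_ excludes exactly the inputs with len(u) < len(v): there A (and B) raises IndexError at u[i].
def Pre_sum_bool_same_len (u : List Bool) (v : List Bool) : Prop := v.length ≤ u.length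
instance (u : List Bool) (v : List Bool) : Decidable (Pre_sum_bool_same_len u v) := by unfold Pre_sum_bool_same_len; infer_instance
def pvWitness_sum_bool_same_len : List Bool × List Bool := ([true, false, true], [true, true, true])
def Spec_sum_bool_same_len (u : List Bool) (v : List Bool) (out : List Bool) : Prop := out = sum_bool_same_len_alt u v
instance (u : List Bool) (v : List Bool) (out : List Bool) : Decidable (Spec_sum_bool_same_len u v out) := by unfold Spec_sum_bool_same_len; infer_instance

-- ===== CLAIM (what is proved, stated in full; the proofs are below) =====
def Claim_equal_sum_bool_same_len : Prop := ∀ (u : List Bool) (v : List Bool), Dom_sum_bool_same_len u v → Pre_sum_bool_same_len u v → Spec_sum_bool_same_len u v (sum_bool_same_len u v)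

-- ===== LEMMAS AND PROOFS =====

-- LSB-first value of a bit list
def valLSB : List Bool → Nat
  | [] => 0
  | b :: t => b.toNat + 2 * valLSB t

-- low n bits of m, LSB-first
def bitsLSB : Nat → Nat → List Bool
  | 0, _ => []
  | n + 1, m => decide (m % 2 = 1) :: bitsLSB n (m / 2)

-- A's ripple-carry adder on LSB-first lists (same branch structure as stepA);
-- returns (digit list, carry out)
def rippleP : List Bool → List Bool → Bool → List Bool × Bool
  | a :: x, b :: y, c =>
    if c then
      if a ^^ b then let r := rippleP x y c; (false :: r.1, r.2)
      else if a && b then let r := rippleP x y c; (true :: r.1, r.2)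
      else let r := rippleP x y false; (true :: r.1, r.2)
    else
      if a ^^ b then let r := rippleP x y c; (true :: r.1, r.2)
      else if a && b then let r := rippleP x y true; (false :: r.1, r.2)
      else let r := rippleP x y c; (false :: r.1, r.2)
  | _, _, c => ([], c)

theorem rippleP_eq_bits (x : List Bool) : ∀ (y : List Bool) (c : Bool),
    x.length = y.length →
    (rippleP x y c).1 = bitsLSB x.length (valLSB x + valLSB y + c.toNat) := by
  induction x with
  | nil =>
    intro y c h
    cases y with
    | nil => simp [rippleP, bitsLSB]
    | cons b t => simp at h
  | cons a x ih =>
    intro y c h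
    cases y with
    | nil => simp at h
    | cons b t =>
      have hl : x.length = t.length := by simpa using h
      rcases a <;> rcases b <;> rcases c <;>
        simp only [rippleP, valLSB, bitsLSB, Bool.toNat, List.length_cons,
          Bool.false_eq_true, Bool.true_eq_false, Bool.xor_false, Bool.xor_true,
          Bool.not_false, Bool.not_true, Bool.and_self, Bool.and_false, Bool.and_true,
          Bool.false_and, Bool.true_and, if_true, if_false, ite_true, ite_false,
          cond_true, cond_false] <;>
        rw [ih t _ hl] <;>
        simp only [List.cons.injEq] <;>
        refine ⟨?_, by congr 1; (try simp only [Bool.toNat, cond_true, cond_false]); omega⟩ <;>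
        symm <;>
        first
          | (rw [decide_eq_true_eq]; omega)
          | (rw [decide_eq_false_iff_not]; omega)

-- A's loop over reversed(range(m)) equals rippleP on the reversed m-prefixes
theorem foldlA_eq_rippleP (u v : List Bool) : ∀ (m : Nat) (c : Bool) (res : List Bool),
    m ≤ u.length → m ≤ v.length →
    (PySem.List.pyRange 0 (m : Int) 1).reverse.foldl (stepA u v) (c, res) =
      ((rippleP ((u.take m).reverse) ((v.take m).reverse) c).2,
       res ++ (rippleP ((u.take m).reverse) ((v.take m).reverse) c).1) := by
  intro m
  induction m with
  | zero => intro c res _ _; simp [PySem.List.pyRange_zero_nat, rippleP]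
  | succ m ih =>
    intro c res hu hv
    have hcast : ((m + 1 : Nat) : Int) = (m : Int) + 1 := by push_cast; ring
    rw [hcast, PySem.List.pyRange_one_succ_right (by positivity), List.reverse_append]
    simp only [List.reverse_cons, List.reverse_nil, List.nil_append, List.singleton_append,
      List.foldl_cons]
    have hum : m < u.length := by omega
    have hvm : m < v.length := by omega
    have hgu : (PySem.List.pyGet? u (m : Int)).getD false = u[m] := by
      simp [PySem.List.pyGet?_natCast, List.getElem?_eq_getElem hum]
    have hgv : (PySem.List.pyGet? v (m : Int)).getD false = v[m] := by
      simp [PySem.List.pyGet?_natCast, List.getElem?_eq_getElem hvm]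
    have htu : (u.take (m + 1)).reverse = u[m] :: (u.take m).reverse := by
      rw [List.take_add_one]; simp [List.getElem?_eq_getElem hum]
    have htv : (v.take (m + 1)).reverse = v[m] :: (v.take m).reverse := by
      rw [List.take_add_one]; simp [List.getElem?_eq_getElem hvm]
    rw [htu, htv]
    rcases ha : u[m] <;> rcases hb : v[m] <;> rcases c <;>
      simp only [stepA, hgu, hgv, ha, hb, Bool.xor_false, Bool.xor_true, Bool.false_xor,
        Bool.true_xor, Bool.and_self, Bool.and_false, Bool.false_and, Bool.and_true,
        Bool.true_and, Bool.not_true, Bool.not_false, if_true, if_false, ite_true, ite_false,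
        cond_true, cond_false, rippleP] <;>
      rw [ih _ _ (by omega) (by omega)] <;> simp

-- B's Horner loop over range(m) computes the value of the reversed m-prefix
theorem foldlB_horner (w : List Bool) : ∀ (m : Nat) (s : Nat), m ≤ w.length →
    (PySem.List.pyRange 0 (m : Int) 1).foldl
      (fun acc i => 2 * acc + ((PySem.List.pyGet? w i).getD false).toNat) s =
      s * 2 ^ m + valLSB ((w.take m).reverse) := by
  intro m
  induction m with
  | zero => intro s _; simp [PySem.List.pyRange_zero_nat, valLSB]
  | succ m ih =>
    intro s h
    have hcast : ((m + 1 : Nat) : Int) = (m : Int) + 1 := by push_cast; ring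
    have hm : m < w.length := by omega
    rw [hcast, PySem.List.pyRange_one_succ_right (by positivity), List.foldl_append]
    rw [ih s (by omega)]
    simp only [List.foldl_cons, List.foldl_nil]
    have ht : (w.take (m + 1)).reverse = w[m] :: (w.take m).reverse := by
      rw [List.take_add_one]; simp [List.getElem?_eq_getElem hm]
    have hg : (PySem.List.pyGet? w (m : Int)).getD false = w[m] := by
      simp [PySem.List.pyGet?_natCast, List.getElem?_eq_getElem hm]
    rw [hg, ht]
    simp only [valLSB]
    rcases w[m] <;> simp [Bool.toNat] <;> ring

-- B's peel loop appends bitsLSB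
theorem peelB_eq_bits : ∀ (n : Nat) (t : Nat) (res : List Bool),
    (peelB n (t, res)).2 = res ++ bitsLSB n t := by
  intro n
  induction n with
  | zero => intro t res; simp [peelB, bitsLSB]
  | succ n ih => intro t res; rw [peelB, ih, bitsLSB]; simp

theorem take_rev_len (w : List Bool) (m : Nat) (h : m ≤ w.length) :
    ((w.take m).reverse).length = m := by simp [List.length_take, Nat.min_eq_left h]

-- ===== VERDICT (by name: the statement is the Claim_ definition above) =====
theorem sum_bool_same_len_spec : Claim_equal_sum_bool_same_len := by
  intro u v _ hpre
  unfold Spec_sum_bool_same_len sum_bool_same_len sum_bool_same_len_alt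
  have hv : v.length ≤ v.length := le_refl _
  rw [foldlA_eq_rippleP u v v.length false [] hpre hv]
  have hsplit := PySem.List.foldl_prod_mk
    (f := fun acc i => 2 * acc + ((PySem.List.pyGet? u i).getD false).toNat)
    (g := fun acc i => 2 * acc + ((PySem.List.pyGet? v i).getD false).toNat)
    (l := PySem.List.pyRange 0 (v.length : Int) 1) (a := 0) (b := 0)
  simp only [hsplit, foldlB_horner u v.length 0 hpre, foldlB_horner v v.length 0 hv,
    peelB_eq_bits, List.nil_append]
  rw [rippleP_eq_bits _ _ _ (by rw [take_rev_len u _ hpre, take_rev_len v _ hv])]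
  rw [take_rev_len u _ hpre]
  simp [List.take_of_length_le (le_refl v.length)]
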